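-- pv_equiv track=rewrite | github.com/ronbutan/AlgorithmDesignAssignment | try.py | reversenumberpattern
-- ===== SOURCE A (Python) =====
-- def reversenumberpattern(n):
--     l = []
--     nums = []
--     for i in range(1,n+1):
--         j = 1
--         nums = []
--         while j < (i+1):
--             nums.append(str(j))
--             j += 1
--         s = " ".join(nums)
--         l.append(s)
--     return "\n".join([s[::-1] for s in l])
-- ===== SOURCE B (Python) =====
-- def reversenumberpattern(n):
--     nums = []
--     lines = []
--     for i in range(1, n + 1):
--         nums.append(str(i))
--         lines.append((" ".join(nums))[::-1])
--     return "\n".join(lines)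
-- ===== Notes on version B (the rewrite author's own statement) =====
-- stated objective: simpler
-- what changed: B keeps one persistent nums list that grows by one element per outer iteration (single accumulation pass) and reverses each joined line as it is produced, instead of A's nested while loop that rebuilds the 1..i list from scratch every iteration and a final reversing list comprehension.
import Mathlib
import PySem

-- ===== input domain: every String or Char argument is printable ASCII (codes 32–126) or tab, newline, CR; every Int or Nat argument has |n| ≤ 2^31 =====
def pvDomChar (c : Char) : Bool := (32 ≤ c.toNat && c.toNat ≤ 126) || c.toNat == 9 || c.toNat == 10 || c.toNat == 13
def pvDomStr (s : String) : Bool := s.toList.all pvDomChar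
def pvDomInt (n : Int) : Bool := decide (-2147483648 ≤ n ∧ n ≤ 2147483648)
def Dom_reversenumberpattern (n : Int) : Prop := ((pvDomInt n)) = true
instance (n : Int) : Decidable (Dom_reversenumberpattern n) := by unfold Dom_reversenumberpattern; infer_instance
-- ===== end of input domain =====

-- B replaces A's per-iteration nested rebuild of the 1..i list with one persistent
-- list that grows by one element per outer iteration (simpler single accumulation pass).

-- ===== PORT A =====
-- the inner 'while j < (i+1): nums.append(str(j)); j += 1' loop of A
def pvWhileA (i j : Int) (nums : List String) : List String :=
  if j < i + 1 then pvWhileA i (j + 1) (nums ++ [PySem.Int.toStr j]) else nums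
termination_by (i + 1 - j).toNat
decreasing_by omega

def reversenumberpattern (n : Int) : String :=
  let l := (PySem.List.pyRange 1 (n + 1) 1).foldl
    (fun (l : List String) i =>
      let nums := pvWhileA i 1 []
      let s := PySem.Str.join " " nums
      l ++ [s]) []
  -- s[::-1]: step -1 is never 0, so slice? always returns some; getD "" is exact here
  PySem.Str.join "\n" (l.map (fun s => (PySem.Str.slice? s none none (-1)).getD ""))

-- ===== PORT B =====
def reversenumberpattern_alt (n : Int) : String :=
  let st := (PySem.List.pyRange 1 (n + 1) 1).foldl
    (fun (st : List String × List String) i =>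
      let nums := st.1 ++ [PySem.Int.toStr i]
      (nums, st.2 ++ [(PySem.Str.slice? (PySem.Str.join " " nums) none none (-1)).getD ""]))
    ([], [])
  PySem.Str.join "\n" st.2

-- ===== PRECONDITION & SPEC =====
def Spec_reversenumberpattern (n : Int) (out : String) : Prop := out = reversenumberpattern_alt n
instance (n : Int) (out : String) : Decidable (Spec_reversenumberpattern n out) := by unfold Spec_reversenumberpattern; infer_instance

-- ===== CLAIM (what is proved, stated in full; the proofs are below) =====
def Claim_equal_reversenumberpattern : Prop := ∀ (n : Int), Dom_reversenumberpattern n → Spec_reversenumberpattern n (reversenumberpattern n)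

-- ===== LEMMAS AND PROOFS =====

-- the reversed line built for row i (shared characterisation of both programs)
def pvRevLine (i : Int) : String :=
  (PySem.Str.slice? (PySem.Str.join " " ((PySem.List.pyRange 1 (i + 1) 1).map PySem.Int.toStr))
    none none (-1)).getD ""

theorem pvWhileA_eq (i : Int) : ∀ (j : Int) (nums : List String),
    pvWhileA i j nums = nums ++ (PySem.List.pyRange j (i + 1) 1).map PySem.Int.toStr := by
  intro j nums
  rw [pvWhileA]
  split
  · rename_i h
    rw [pvWhileA_eq i (j + 1), PySem.List.pyRange_one_cons h]
    simp
  · rename_i h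
    rw [PySem.List.pyRange_one_eq_nil (by omega)]
    simp
termination_by j => (i + 1 - j).toNat
decreasing_by omega

theorem pvFoldA_eq (n : Int) :
    (PySem.List.pyRange 1 (n + 1) 1).foldl
      (fun (l : List String) i =>
        let nums := pvWhileA i 1 []
        let s := PySem.Str.join " " nums
        l ++ [s]) []
    = (PySem.List.pyRange 1 (n + 1) 1).map
        (fun i => PySem.Str.join " " ((PySem.List.pyRange 1 (i + 1) 1).map PySem.Int.toStr)) := by
  have hf : (fun (l : List String) i =>
      let nums := pvWhileA i 1 []
      let s := PySem.Str.join " " nums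
      l ++ [s])
      = fun (l : List String) i =>
          l ++ [PySem.Str.join " " ((PySem.List.pyRange 1 (i + 1) 1).map PySem.Int.toStr)] := by
    funext l i
    simp [pvWhileA_eq]
  rw [hf]
  simpa using PySem.List.foldl_append_singleton_eq_map (l := PySem.List.pyRange 1 (n + 1) 1)
    (acc := [])
    (f := fun i => PySem.Str.join " " ((PySem.List.pyRange 1 (i + 1) 1).map PySem.Int.toStr))


theorem pvFoldB_eq (b : Int) : ∀ (a : Int), 1 ≤ a → ∀ (lines : List String),
    ((PySem.List.pyRange a b 1).foldl
      (fun (st : List String × List String) i =>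
        let nums := st.1 ++ [PySem.Int.toStr i]
        (nums, st.2 ++ [(PySem.Str.slice? (PySem.Str.join " " nums) none none (-1)).getD ""]))
      ((PySem.List.pyRange 1 a 1).map PySem.Int.toStr, lines)).2
    = lines ++ (PySem.List.pyRange a b 1).map pvRevLine := by
  intro a ha lines
  by_cases h : a < b
  · rw [PySem.List.pyRange_one_cons h]
    simp only [List.foldl_cons]
    have hstep : (PySem.List.pyRange 1 a 1).map PySem.Int.toStr ++ [PySem.Int.toStr a]
        = (PySem.List.pyRange 1 (a + 1) 1).map PySem.Int.toStr := by
      rw [PySem.List.pyRange_one_succ_right ha]; simp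
    have := pvFoldB_eq b (a + 1) (by omega)
      (lines ++ [(PySem.Str.slice? (PySem.Str.join " "
        ((PySem.List.pyRange 1 a 1).map PySem.Int.toStr ++ [PySem.Int.toStr a])) none none (-1)).getD ""])
    simp only [hstep] at this ⊢
    rw [this]
    simp [pvRevLine, List.map_cons, List.append_assoc]
  · have h1 : PySem.List.pyRange a b 1 = [] := PySem.List.pyRange_one_eq_nil (by omega)
    rw [h1]
    simp
termination_by a => (b - a).toNat
decreasing_by omega

-- ===== VERDICT (by name: the statement is the Claim_ definition above) =====
theorem reversenumberpattern_spec : Claim_equal_reversenumberpattern := by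
  intro n _
  unfold Spec_reversenumberpattern reversenumberpattern reversenumberpattern_alt
  have hb := pvFoldB_eq (n + 1) 1 le_rfl []
  have h1 : PySem.List.pyRange 1 1 1 = [] := PySem.List.pyRange_one_eq_nil le_rfl
  rw [h1] at hb
  simp only [List.map_nil, List.nil_append] at hb
  simp only [hb, pvFoldA_eq, List.map_map]
  rfl
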